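-- pv_equiv track=rewrite | github.com/sashaperigo/gedcom-tools | viz_ancestors.py | build_addr_by_place
-- ===== SOURCE A (Python) =====
-- def build_addr_by_place(indis: dict) -> dict:
--     """Return {place: [sorted unique addr values]} for ADDR auto-complete in the event modal."""
--     result: dict[str, set] = {}
--     for info in indis.values():
--         for evt in info['events']:
--             place = evt.get('place') or ''
--             addr  = evt.get('addr')  or ''
--             if place and addr:
--                 result.setdefault(place, set()).add(addr)
--     return {k: sorted(v) for k, v in result.items()}
-- ===== SOURCE B (Python) =====
-- def build_addr_by_place(indis: dict) -> dict:
--     """Return {place: [sorted unique addr values]} for ADDR auto-complete in the event modal."""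
--     pairs = []
--     for info in indis.values():
--         for evt in info['events']:
--             place = evt.get('place') or ''
--             addr  = evt.get('addr')  or ''
--             if place and addr:
--                 pairs.append((place, addr))
--     out = {}
--     for place, _ in pairs:
--         if place not in out:
--             out[place] = sorted({a for p, a in pairs if p == place})
--     return out
-- ===== Notes on version B (the rewrite author's own statement) =====
-- stated objective: alternative
-- what changed: Replaces the incrementally maintained dict-of-sets with a flat (place, addr) pair list built in one pass, then groups it by scanning the pair list once per distinct place (set comprehension + sorted), instead of setdefault/add during traversal.
import Mathlib
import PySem

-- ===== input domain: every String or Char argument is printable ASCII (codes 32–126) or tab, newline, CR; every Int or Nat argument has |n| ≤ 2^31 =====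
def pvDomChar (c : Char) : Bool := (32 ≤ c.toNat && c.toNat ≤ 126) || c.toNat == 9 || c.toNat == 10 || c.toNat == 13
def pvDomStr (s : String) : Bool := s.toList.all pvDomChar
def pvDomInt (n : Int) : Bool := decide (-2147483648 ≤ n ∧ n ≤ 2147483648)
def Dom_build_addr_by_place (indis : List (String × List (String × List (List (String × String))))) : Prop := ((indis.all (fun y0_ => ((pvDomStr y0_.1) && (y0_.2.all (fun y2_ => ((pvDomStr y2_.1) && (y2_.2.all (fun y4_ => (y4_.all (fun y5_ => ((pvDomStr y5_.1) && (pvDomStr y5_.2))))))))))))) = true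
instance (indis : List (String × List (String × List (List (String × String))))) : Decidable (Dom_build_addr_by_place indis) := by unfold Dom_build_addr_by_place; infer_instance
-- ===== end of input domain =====

-- B builds one flat (place, addr) pair list and then groups it per distinct place by
-- scanning that list, instead of A's incrementally maintained dict of sets.
-- Equivalence is about the return value only (neither version mutates its argument).

-- shared helper: evt.get(k) or ''  (a missing key and an empty string both yield '')
def pvEvtGet (evt : List (String × String)) (k : String) : String :=
  ((PySem.Dict.mk evt).get? k).getD ""

-- info['events'] — total form; Pre_ below guarantees the key is present (else Python raises KeyError)
def pvEvents (info : List (String × List (List (String × String)))) : List (List (String × String)) :=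
  ((PySem.Dict.mk info).get? "events").getD []

-- ===== PORT A =====
def build_addr_by_place (indis : List (String × List (String × List (List (String × String))))) : List (String × List String) :=
  let result : PySem.Dict String (PySem.Set String) :=
    indis.foldl (fun result info =>
      (pvEvents info.2).foldl (fun result evt =>
        let place := pvEvtGet evt "place"
        let addr := pvEvtGet evt "addr"
        if place ≠ "" ∧ addr ≠ "" then
          -- result.setdefault(place, set()).add(addr)
          result.modify place PySem.Set.empty (fun s => PySem.Set.add s addr)
        else result) result) (PySem.Dict.mk [])
  result.items.map (fun kv => (kv.1, PySem.List.sorted kv.2 (fun x => x) false))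

-- ===== PORT B =====
def build_addr_by_place_alt (indis : List (String × List (String × List (List (String × String))))) : List (String × List String) :=
  let pairs : List (String × String) :=
    indis.foldl (fun pairs info =>
      (pvEvents info.2).foldl (fun pairs evt =>
        let place := pvEvtGet evt "place"
        let addr := pvEvtGet evt "addr"
        if place ≠ "" ∧ addr ≠ "" then pairs ++ [(place, addr)] else pairs) pairs) []
  let out : PySem.Dict String (List String) :=
    pairs.foldl (fun out pr =>
      if out.contains pr.1 then out
      else out.insert pr.1
        (PySem.List.sorted
          (PySem.Set.ofList ((pairs.filter (fun q => q.1 == pr.1)).map (fun q => q.2)))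
          (fun x => x) false)) (PySem.Dict.mk [])
  out.items

-- ===== PRECONDITION & SPEC =====
-- Pre_ excludes exactly the inputs where some individual's dict lacks the 'events' key,
-- on which Python A raises KeyError.
def Pre_build_addr_by_place (indis : List (String × List (String × List (List (String × String))))) : Prop :=
  ∀ info ∈ indis, ((PySem.Dict.mk info.2).get? "events").isSome = true
instance (indis : List (String × List (String × List (List (String × String))))) : Decidable (Pre_build_addr_by_place indis) := by unfold Pre_build_addr_by_place; infer_instance

def pvWitness_build_addr_by_place : (List (String × List (String × List (List (String × String))))) :=
  [("I1", [("events", [[("place", "Paris"), ("addr", "1 Main St")]])])]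

def Spec_build_addr_by_place (indis : List (String × List (String × List (List (String × String))))) (out : List (String × List String)) : Prop := out = build_addr_by_place_alt indis
instance (indis : List (String × List (String × List (List (String × String))))) (out : List (String × List String)) : Decidable (Spec_build_addr_by_place indis out) := by unfold Spec_build_addr_by_place; infer_instance

-- ===== CLAIM (what is proved, stated in full; the proofs are below) =====
def Claim_equal_build_addr_by_place : Prop := ∀ (indis : List (String × List (String × List (List (String × String))))), Dom_build_addr_by_place indis → Pre_build_addr_by_place indis → Spec_build_addr_by_place indis (build_addr_by_place indis)

-- ===== LEMMAS AND PROOFS =====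

-- the flat filtered (place, addr) pair list both loops traverse
def pvPairsOf (indis : List (String × List (String × List (List (String × String))))) : List (String × String) :=
  indis.flatMap (fun info =>
    ((pvEvents info.2).filter
        (fun evt => decide (pvEvtGet evt "place" ≠ "" ∧ pvEvtGet evt "addr" ≠ ""))).map
      (fun evt => (pvEvtGet evt "place", pvEvtGet evt "addr")))

-- addr values of ps grouped under place k
def pvGrp (ps : List (String × String)) (k : String) : List String :=
  (ps.filter (fun q => q.1 == k)).map (fun q => q.2)

-- A's accumulator step on a flat pair
def pvStepA (d : PySem.Dict String (PySem.Set String)) (pr : String × String) : PySem.Dict String (PySem.Set String) :=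
  d.modify pr.1 PySem.Set.empty (fun s => PySem.Set.add s pr.2)

theorem pvInnerA (evts : List (List (String × String))) (d : PySem.Dict String (PySem.Set String)) :
    evts.foldl (fun result evt =>
      let place := pvEvtGet evt "place"
      let addr := pvEvtGet evt "addr"
      if place ≠ "" ∧ addr ≠ "" then
        result.modify place PySem.Set.empty (fun s => PySem.Set.add s addr)
      else result) d
    = (((evts.filter
          (fun evt => decide (pvEvtGet evt "place" ≠ "" ∧ pvEvtGet evt "addr" ≠ ""))).map
        (fun evt => (pvEvtGet evt "place", pvEvtGet evt "addr")))).foldl pvStepA d := by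
  induction evts generalizing d with
  | nil => rfl
  | cons e t ih =>
    by_cases h : pvEvtGet e "place" ≠ "" ∧ pvEvtGet e "addr" ≠ ""
    · have hb : decide (pvEvtGet e "place" ≠ "" ∧ pvEvtGet e "addr" ≠ "") = true := by simpa using h
      simp only [List.foldl_cons, List.filter_cons, hb, if_pos h, List.map_cons, if_true, pvStepA]
      exact ih _
    · have hb : decide (pvEvtGet e "place" ≠ "" ∧ pvEvtGet e "addr" ≠ "") = false := by simpa using h
      simp only [List.foldl_cons, List.filter_cons, hb, if_neg h, Bool.false_eq_true, if_false]
      exact ih d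

theorem pvFlatA (indis : List (String × List (String × List (List (String × String)))))
    (d : PySem.Dict String (PySem.Set String)) :
    indis.foldl (fun result info =>
      (pvEvents info.2).foldl (fun result evt =>
        let place := pvEvtGet evt "place"
        let addr := pvEvtGet evt "addr"
        if place ≠ "" ∧ addr ≠ "" then
          result.modify place PySem.Set.empty (fun s => PySem.Set.add s addr)
        else result) result) d
    = (pvPairsOf indis).foldl pvStepA d := by
  induction indis generalizing d with
  | nil => rfl
  | cons i t ih =>
    simp only [List.foldl_cons, pvPairsOf, List.flatMap_cons, List.foldl_append]
    rw [pvInnerA]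
    exact ih _

theorem pvInnerB (evts : List (List (String × String))) (acc : List (String × String)) :
    evts.foldl (fun pairs evt =>
      let place := pvEvtGet evt "place"
      let addr := pvEvtGet evt "addr"
      if place ≠ "" ∧ addr ≠ "" then pairs ++ [(place, addr)] else pairs) acc
    = acc ++ ((evts.filter
          (fun evt => decide (pvEvtGet evt "place" ≠ "" ∧ pvEvtGet evt "addr" ≠ ""))).map
        (fun evt => (pvEvtGet evt "place", pvEvtGet evt "addr"))) := by
  induction evts generalizing acc with
  | nil => simp
  | cons e t ih =>
    by_cases h : pvEvtGet e "place" ≠ "" ∧ pvEvtGet e "addr" ≠ ""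
    · have hb : decide (pvEvtGet e "place" ≠ "" ∧ pvEvtGet e "addr" ≠ "") = true := by simpa using h
      simp only [List.foldl_cons, List.filter_cons, hb, if_pos h, List.map_cons, if_true]
      rw [ih]; simp
    · have hb : decide (pvEvtGet e "place" ≠ "" ∧ pvEvtGet e "addr" ≠ "") = false := by simpa using h
      simp only [List.foldl_cons, List.filter_cons, hb, if_neg h, Bool.false_eq_true, if_false]
      exact ih acc

theorem pvFlatB (indis : List (String × List (String × List (List (String × String)))))
    (acc : List (String × String)) :
    indis.foldl (fun pairs info =>
      (pvEvents info.2).foldl (fun pairs evt =>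
        let place := pvEvtGet evt "place"
        let addr := pvEvtGet evt "addr"
        if place ≠ "" ∧ addr ≠ "" then pairs ++ [(place, addr)] else pairs) pairs) acc
    = acc ++ pvPairsOf indis := by
  induction indis generalizing acc with
  | nil => simp [pvPairsOf]
  | cons i t ih =>
    simp only [List.foldl_cons, pvPairsOf, List.flatMap_cons]
    rw [pvInnerB, ih, List.append_assoc]
    rfl

-- lookup in a dict whose items are keys.map (k, F k)
theorem pvGetMapF (keys : List String) (F : String → α) (k0 : String) (h : k0 ∈ keys) :
    (PySem.Dict.mk (keys.map (fun k => (k, F k)))).get? k0 = some (F k0) := by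
  induction keys with
  | nil => cases h
  | cons k t ih =>
    by_cases hk : k = k0
    · subst hk; simp [PySem.Dict.get?]
    · have : k0 ∈ t := by cases h with
        | head => exact absurd rfl hk
        | tail _ h => exact h
      simpa [PySem.Dict.get?, hk, List.find?] using ih this

theorem pvContainsMapF (keys : List String) (F : String → α) (k0 : String) :
    (PySem.Dict.mk (keys.map (fun k => (k, F k)))).contains k0 = decide (k0 ∈ keys) := by
  induction keys with
  | nil => simp [PySem.Dict.contains]
  | cons k t ih =>
    by_cases hk : k = k0
    · subst hk; simp [PySem.Dict.contains]
    · simp only [PySem.Dict.contains, List.map_cons, List.any_cons] at *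
      simp [ih, hk, Ne.symm hk, beq_iff_eq]

theorem pvOfListSnoc {α : Type} [BEq α] (xs : List α) (x : α) :
    PySem.Set.ofList (xs ++ [x]) = PySem.Set.add (PySem.Set.ofList xs) x := by
  simp [PySem.Set.ofList, List.foldl_append]

theorem pvGrpSnoc (ps : List (String × String)) (pr : String × String) (k : String) :
    pvGrp (ps ++ [pr]) k = pvGrp ps k ++ (if pr.1 == k then [pr.2] else []) := by
  simp only [pvGrp, List.filter_append]
  by_cases h : pr.1 == k <;> simp [h]

theorem pvGrpNil (ps : List (String × String)) (k : String) (h : k ∉ ps.map Prod.fst) :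
    pvGrp ps k = [] := by
  simp only [pvGrp, List.map_eq_nil_iff, List.filter_eq_nil_iff]
  intro q hq hqk
  exact h (List.mem_map.mpr ⟨q, hq, by simpa [beq_iff_eq] using hqk⟩)

theorem pvMemDedup {α : Type} [BEq α] [LawfulBEq α] (xs : List α) (x : α) :
    x ∈ PySem.List.dedup xs ↔ x ∈ xs := PySem.List.mem_dedup ..

theorem pvDedupSnoc (xs : List String) (x : String) :
    PySem.List.dedup (xs ++ [x]) = PySem.Set.add (PySem.List.dedup xs) x := by
  simp [PySem.List.dedup, pvOfListSnoc]

-- closed form of A's dict loop over the flat pairs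
theorem pvAclosed (ps : List (String × String)) :
    (ps.foldl pvStepA (PySem.Dict.mk [])).items
    = (PySem.List.dedup (ps.map Prod.fst)).map
        (fun k => (k, PySem.Set.ofList (pvGrp ps k))) := by
  induction ps using List.reverseRecOn with
  | nil => rfl
  | append_singleton ps pr ih =>
    rw [List.foldl_append, List.foldl_cons, List.foldl_nil]
    have hd : ps.foldl pvStepA (PySem.Dict.mk [])
        = PySem.Dict.mk ((PySem.List.dedup (ps.map Prod.fst)).map
          (fun k => (k, PySem.Set.ofList (pvGrp ps k)))) := by
      apply PySem.Dict.ext; rw [ih]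
    rw [hd]
    have hcon := pvContainsMapF (PySem.List.dedup (ps.map Prod.fst))
      (fun k => PySem.Set.ofList (pvGrp ps k)) pr.1
    simp only [List.map_append, List.map_cons, List.map_nil, pvDedupSnoc, PySem.Set.add]
    by_cases hmem : pr.1 ∈ PySem.List.dedup (ps.map Prod.fst)
    · -- key already present: modify rewrites the stored set in place
      have hget := pvGetMapF (PySem.List.dedup (ps.map Prod.fst))
        (fun k => PySem.Set.ofList (pvGrp ps k)) pr.1 hmem
      rw [if_pos (by simpa [PySem.Set.contains] using hmem)]
      simp only [pvStepA, PySem.Dict.modify, PySem.Dict.getD, hget, Option.getD_some,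
        PySem.Dict.insert, hcon, hmem, decide_true, if_true]
      show List.map _ (List.map _ _) = _
      rw [List.map_map, List.map_congr_left]
      intro k hk
      by_cases hke : k = pr.1
      · subst hke
        simp [Function.comp, pvGrpSnoc, pvOfListSnoc]
      · simp [Function.comp, hke, Ne.symm hke, pvGrpSnoc, beq_iff_eq]
    · -- fresh key: modify appends (pr.1, {pr.2}) at the end
      have hget : (PySem.Dict.mk ((PySem.List.dedup (ps.map Prod.fst)).map
          (fun k => (k, PySem.Set.ofList (pvGrp ps k))))).get? pr.1 = none := by
        simp only [PySem.Dict.get?, Option.map_eq_none_iff, List.find?_eq_none]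
        intro p hp
        rcases List.mem_map.mp hp with ⟨k, hk, rfl⟩
        simp only [beq_iff_eq]
        intro h
        exact hmem (h ▸ hk)
      rw [if_neg (by simpa [PySem.Set.contains] using hmem)]
      simp only [pvStepA, PySem.Dict.modify, PySem.Dict.getD, hget, Option.getD_none,
        PySem.Dict.insert, hcon, hmem, decide_false, if_false, Bool.false_eq_true]
      show (List.map _ _) ++ _ = _
      rw [List.map_append]
      congr 1
      · apply List.map_congr_left
        intro k hk
        have hke : pr.1 ≠ k := fun h => hmem (by rw [h]; exact hk)
        simp [pvGrpSnoc, hke, beq_iff_eq]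
      · have hnil : pvGrp ps pr.1 = [] :=
          pvGrpNil ps pr.1 (fun h => hmem ((pvMemDedup _ _).mpr h))
        simp [pvGrpSnoc, hnil, PySem.Set.add, PySem.Set.empty,
          PySem.Set.ofList, PySem.Set.contains]

-- closed form of B's grouping loop (full is the complete pair list the values are read from)
theorem pvBclosed (full : List (String × String)) (ps : List (String × String)) :
    (ps.foldl (fun out pr =>
      if out.contains pr.1 then out
      else out.insert pr.1
        (PySem.List.sorted
          (PySem.Set.ofList ((full.filter (fun q => q.1 == pr.1)).map (fun q => q.2)))
          (fun x => x) false)) (PySem.Dict.mk [])).items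
    = (PySem.List.dedup (ps.map Prod.fst)).map
        (fun k => (k, PySem.List.sorted (PySem.Set.ofList (pvGrp full k)) (fun x => x) false)) := by
  induction ps using List.reverseRecOn with
  | nil => rfl
  | append_singleton ps pr ih =>
    rw [List.foldl_append, List.foldl_cons, List.foldl_nil]
    have hd : ps.foldl (fun out pr =>
        if out.contains pr.1 then out
        else out.insert pr.1
          (PySem.List.sorted
            (PySem.Set.ofList ((full.filter (fun q => q.1 == pr.1)).map (fun q => q.2)))
            (fun x => x) false)) (PySem.Dict.mk [])
        = PySem.Dict.mk ((PySem.List.dedup (ps.map Prod.fst)).map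
          (fun k => (k, PySem.List.sorted (PySem.Set.ofList (pvGrp full k)) (fun x => x) false))) := by
      apply PySem.Dict.ext; rw [ih]
    rw [hd]
    have hcon := pvContainsMapF (PySem.List.dedup (ps.map Prod.fst))
      (fun k => PySem.List.sorted (PySem.Set.ofList (pvGrp full k)) (fun x => x) false) pr.1
    simp only [List.map_append, List.map_cons, List.map_nil, pvDedupSnoc, PySem.Set.add]
    by_cases hmem : pr.1 ∈ PySem.List.dedup (ps.map Prod.fst)
    · rw [hcon, if_pos (decide_eq_true hmem),
        if_pos (by simpa [PySem.Set.contains] using hmem)]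
    · rw [hcon, if_neg (by simp only [decide_eq_true_eq]; exact hmem),
        if_neg (by simpa [PySem.Set.contains] using hmem)]
      rw [PySem.Dict.insert, if_neg (by rw [hcon]; simp only [decide_eq_true_eq]; exact hmem)]
      show (_ ++ _ : List _) = _
      rw [List.map_append]
      congr 1

-- ===== VERDICT (by name: the statement is the Claim_ definition above) =====
theorem build_addr_by_place_spec : Claim_equal_build_addr_by_place := by
  intro indis _ _
  show build_addr_by_place indis = build_addr_by_place_alt indis
  unfold build_addr_by_place build_addr_by_place_alt
  rw [pvFlatA, pvFlatB, List.nil_append]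
  rw [pvBclosed (pvPairsOf indis) (pvPairsOf indis)]
  show ((pvPairsOf indis).foldl pvStepA (PySem.Dict.mk [])).items.map
      (fun kv => (kv.1, PySem.List.sorted kv.2 (fun x => x) false)) = _
  rw [pvAclosed, List.map_map]
  rfl
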